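-- pv_equiv track=rewrite | github.com/minyoungcho99/Programming-Basics | Python/dict_try_except.py | sportManagement
-- ===== SOURCE A (Python) =====
-- def sportManagement(countryDict):
--     sportDict = {}
--     for key, value in countryDict.items():
--         for sport in value:
--             if sport not in sportDict:
--                 sportDict[sport] = [key]
--             else:
--                  sportDict[sport].append(key)
--                  sportDict[sport].sort()
--     return sportDict
-- ===== SOURCE B (Python) =====
-- def sportManagement(countryDict):
--     events = [(sport, country) for country, sports in countryDict.items() for sport in sports]
--     result = {sport: [] for sport, _ in events}
--     for sport, country in sorted(events, key=lambda p: p[1]):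
--         result[sport].append(country)
--     return result
-- ===== Notes on version B (the rewrite author's own statement) =====
-- stated objective: faster
-- what changed: B flattens the dict into (sport, country) events, performs one global stable sort of all events by country, and groups them in a single pass into a dict pre-seeded with the sports in first-occurrence order, instead of A's nested loop that inserts into each sport's list and re-sorts that list after every append.
import Mathlib
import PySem

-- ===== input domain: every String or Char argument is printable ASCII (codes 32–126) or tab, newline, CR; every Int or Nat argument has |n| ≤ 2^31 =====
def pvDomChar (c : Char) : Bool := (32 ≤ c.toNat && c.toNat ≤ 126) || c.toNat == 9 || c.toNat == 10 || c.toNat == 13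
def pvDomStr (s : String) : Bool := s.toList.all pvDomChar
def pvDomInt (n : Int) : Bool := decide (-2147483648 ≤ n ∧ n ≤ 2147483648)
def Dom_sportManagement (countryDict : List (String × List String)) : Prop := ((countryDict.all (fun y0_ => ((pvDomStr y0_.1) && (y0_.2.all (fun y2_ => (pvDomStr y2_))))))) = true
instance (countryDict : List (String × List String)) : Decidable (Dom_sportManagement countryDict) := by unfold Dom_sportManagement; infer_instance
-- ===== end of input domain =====

-- B flattens into (sport, country) events, sorts them once globally by country, and groups
-- in one pass into a dict pre-seeded in first-occurrence order, instead of A's nested insert-and-resort of each list.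

-- ===== PORT A =====
def sportManagement (countryDict : List (String × List String)) : List (String × List String) :=
  (countryDict.foldl (fun sportDict kv =>
      kv.2.foldl (fun sportDict sport =>
        if sportDict.contains sport = false then
          sportDict.insert sport [kv.1]
        else
          sportDict.modify sport [] (fun l => PySem.List.sorted (l ++ [kv.1]) (fun x => x) false))
        sportDict)
    PySem.Dict.empty).items

-- ===== PORT B =====
def sportManagement_alt (countryDict : List (String × List String)) : List (String × List String) :=
  let events := countryDict.flatMap (fun kv => kv.2.map (fun s => (s, kv.1)))
  let result := events.foldl (fun d p => d.insert p.1 ([] : List String)) PySem.Dict.empty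
  ((PySem.List.sorted events (fun p => p.2) false).foldl
      (fun d p => d.modify p.1 [] (fun l => l ++ [p.2])) result).items

-- ===== PRECONDITION & SPEC =====
def Spec_sportManagement (countryDict : List (String × List String)) (out : List (String × List String)) : Prop := out = sportManagement_alt countryDict
instance (countryDict : List (String × List String)) (out : List (String × List String)) : Decidable (Spec_sportManagement countryDict out) := by unfold Spec_sportManagement; infer_instance

-- ===== CLAIM (what is proved, stated in full; the proofs are below) =====
def Claim_equal_sportManagement : Prop := ∀ (countryDict : List (String × List String)), Dom_sportManagement countryDict → Spec_sportManagement countryDict (sportManagement countryDict)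

-- ===== LEMMAS AND PROOFS =====

-- the per-(sport, country) step of A's loop
def pvStepA (d : PySem.Dict String (List String)) (p : String × String) : PySem.Dict String (List String) :=
  if d.contains p.1 = false then d.insert p.1 [p.2]
  else d.modify p.1 [] (fun l => PySem.List.sorted (l ++ [p.2]) (fun x => x) false)

-- the nested loops of A flattened into one fold over (sport, country) events
def pvEvents (countryDict : List (String × List String)) : List (String × String) :=
  countryDict.flatMap (fun kv => kv.2.map (fun s => (s, kv.1)))

lemma pv_flatten (g : PySem.Dict String (List String) → String × String → PySem.Dict String (List String))
    (countryDict : List (String × List String)) (d : PySem.Dict String (List String)) :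
    countryDict.foldl (fun d kv => kv.2.foldl (fun d s => g d (s, kv.1)) d) d
      = (pvEvents countryDict).foldl g d := by
  induction countryDict generalizing d with
  | nil => rfl
  | cons kv rest ih =>
      simp only [List.foldl_cons]
      rw [ih]
      simp [pvEvents, List.foldl_append, List.foldl_map]

lemma pv_portA_eq (countryDict : List (String × List String)) :
    sportManagement countryDict = ((pvEvents countryDict).foldl pvStepA PySem.Dict.empty).items := by
  rw [← pv_flatten pvStepA]
  rfl

-- A's loop grows the key list exactly like a Set.update over the sports
lemma pv_keysA (l : List (String × String)) :
    ∀ (d : PySem.Dict String (List String)),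
      (l.foldl pvStepA d).keys = PySem.Set.update d.keys (l.map Prod.fst) := by
  induction l with
  | nil => intro d; simp [PySem.Set.update_nil]
  | cons p rest ih =>
      intro d
      simp only [List.foldl_cons, List.map_cons, PySem.Set.update_cons]
      rw [ih]
      congr 1
      by_cases hc : d.contains p.1 = true
      · have e : pvStepA d p
            = d.modify p.1 [] (fun l => PySem.List.sorted (l ++ [p.2]) (fun x => x) false) := by
          simp [pvStepA, hc]
        have hm : p.1 ∈ d.keys := (PySem.Dict.contains_iff_mem_keys d p.1).mp hc
        rw [e, PySem.Dict.keys_modify, PySem.Dict.keys_insert_of_contains _ _ hc,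
          PySem.Set.add_of_mem hm]
      · have hc' : d.contains p.1 = false := by simpa using hc
        have hm : p.1 ∉ d.keys := fun h => by
          simp [(PySem.Dict.contains_iff_mem_keys d p.1).mpr h] at hc'
        rw [show pvStepA d p = d.insert p.1 [p.2] by simp [pvStepA, hc'],
          PySem.Dict.keys_insert_of_not_contains _ _ hc', PySem.Set.add_of_not_mem hm]

-- each value of A's result is the sorted list of countries of that sport
lemma pv_getD_A (l : List (String × String)) :
    ∀ (d : PySem.Dict String (List String)),
      (∀ j, (d.getD j []).Pairwise (· ≤ ·)) → ∀ k,
      (l.foldl pvStepA d).getD k []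
        = PySem.List.sorted (d.getD k [] ++ (l.filter (fun p => p.1 == k)).map (·.2)) (fun x => x) false := by
  induction l with
  | nil =>
      intro d hs k
      simpa using (PySem.List.sorted_eq_self_of_pairwise (d.getD k []) (fun x => x) (hs k)).symm
  | cons p rest ih =>
      intro d hs k
      have hstep : ∀ j, (pvStepA d p).getD j []
          = if j = p.1 then PySem.List.sorted (d.getD p.1 [] ++ [p.2]) (fun x => x) false
            else d.getD j [] := by
        intro j
        by_cases hc : d.contains p.1 = true
        · simp [pvStepA, hc, PySem.Dict.getD_modify]
        · have hc' : d.contains p.1 = false := by simpa using hc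
          have h0 : d.getD p.1 [] = [] := PySem.Dict.getD_of_not_contains _ _ hc'
          rcases eq_or_ne j p.1 with hj | hj
          · subst hj
            simp only [pvStepA, hc', if_true, PySem.Dict.getD_insert_self, h0, List.nil_append]
            rfl
          · simp only [pvStepA, hc', if_true,
              PySem.Dict.getD_insert_of_ne _ _ _ hj, if_neg hj]
      have hs' : ∀ j, ((pvStepA d p).getD j []).Pairwise (· ≤ ·) := by
        intro j
        rw [hstep j]
        split_ifs with hj
        · exact PySem.List.sorted_pairwise _ _
        · exact hs j
      simp only [List.foldl_cons]
      rw [ih (pvStepA d p) hs' k, hstep k]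
      by_cases hk : k = p.1
      · have hpk : (p.1 == k) = true := by simp [hk]
        rw [if_pos hk]
        have hfil : (p :: rest).filter (fun q => q.1 == k) = p :: rest.filter (fun q => q.1 == k) := by
          simp [hpk]
        rw [hfil, List.map_cons]
        refine PySem.List.sorted_eq_sorted_of_perm _ _ _ (fun a b h => h) ?_
        rw [hk]
        calc (PySem.List.sorted (d.getD p.1 [] ++ [p.2]) (fun x => x) false
                ++ (rest.filter (fun q => q.1 == p.1)).map (·.2)).Perm
              ((d.getD p.1 [] ++ [p.2]) ++ (rest.filter (fun q => q.1 == p.1)).map (·.2)) :=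
                (PySem.List.sorted_perm _ _ _).append_right _
          _ = d.getD p.1 [] ++ p.2 :: (rest.filter (fun q => q.1 == p.1)).map (·.2) := by simp
      · rw [if_neg hk]
        have hfil : (p :: rest).filter (fun q => q.1 == k) = rest.filter (fun q => q.1 == k) := by
          simp [List.filter_cons]
          intro h
          exact absurd h.symm hk
        rw [hfil]

-- B's seeding pass stores only empty lists
lemma pv_getD_seed (l : List (String × String)) :
    ∀ (d : PySem.Dict String (List String)), (∀ j, d.getD j [] = []) → ∀ k,
      ((l.foldl (fun d p => d.insert p.1 ([] : List String)) d).getD k []) = [] := by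
  induction l with
  | nil => intro d h k; exact h k
  | cons p rest ih =>
      intro d h k
      simp only [List.foldl_cons]
      refine ih _ (fun j => ?_) k
      rw [PySem.Dict.getD_insert]
      split_ifs with hj
      · rfl
      · exact h j

-- ===== VERDICT (by name: the statement is the Claim_ definition above) =====
theorem sportManagement_spec : Claim_equal_sportManagement := by
  intro countryDict _
  unfold Spec_sportManagement
  rw [pv_portA_eq]
  show _ = ((PySem.List.sorted (pvEvents countryDict) (fun p => p.2) false).foldl
      (fun d p => d.modify p.1 [] (fun v => v ++ [p.2]))
      ((pvEvents countryDict).foldl (fun d p => d.insert p.1 ([] : List String))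
        PySem.Dict.empty)).items
  set l := pvEvents countryDict with hl
  set ls := PySem.List.sorted l (fun p : String × String => p.2) false with hls
  set d0 := l.foldl (fun d p => d.insert p.1 ([] : List String)) PySem.Dict.empty with hd0
  set dA := l.foldl pvStepA PySem.Dict.empty with hdA
  set dB := ls.foldl (fun d p => d.modify p.1 [] (fun v => v ++ [p.2])) d0 with hdB
  have hperm : ls.Perm l := PySem.List.sorted_perm l (fun p => p.2) false
  have hk0 : d0.keys = PySem.Set.ofList (l.map Prod.fst) := by
    rw [hd0, PySem.Dict.keys_foldl_insert_key l Prod.fst (fun _ _ => ([] : List String))]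
    exact PySem.Set.update_nil_left _
  have hkA : dA.keys = PySem.Set.ofList (l.map Prod.fst) := by
    rw [hdA, pv_keysA]
    exact PySem.Set.update_nil_left _
  have hkB : dB.keys = d0.keys := by
    rw [hdB, PySem.Dict.keys_foldl_modify_key ls Prod.fst ([] : List String)
      (fun _ p => fun v => v ++ [p.2]) d0]
    rw [PySem.Set.update_eq_append_filter]
    have hnil : (PySem.Set.ofList (ls.map Prod.fst)).filter
        (fun y => !PySem.Set.contains d0.keys y) = [] := by
      rw [List.filter_eq_nil_iff]
      intro y hy
      have hy1 : y ∈ ls.map Prod.fst := (PySem.Set.mem_ofList _ _).mp hy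
      have hy2 : y ∈ l.map Prod.fst := (hperm.map Prod.fst).mem_iff.mp hy1
      have hy3 : y ∈ d0.keys := by rw [hk0]; exact (PySem.Set.mem_ofList _ _).mpr hy2
      simpa using hy3
    rw [hnil, List.append_nil]
  have hndA : dA.keys.Nodup := by rw [hkA]; exact PySem.Set.nodup_ofList _
  have hndB : dB.keys.Nodup := by rw [hkB, hk0]; exact PySem.Set.nodup_ofList _
  rw [PySem.Dict.items_eq_map_keys dA hndA [], PySem.Dict.items_eq_map_keys dB hndB [],
    hkA, hkB, hk0]
  apply List.map_congr_left
  intro k _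
  have hA : dA.getD k []
      = PySem.List.sorted ((l.filter (fun p => p.1 == k)).map (·.2)) (fun x => x) false := by
    rw [hdA, pv_getD_A l PySem.Dict.empty (by simp) k]
    simp
  have hB : dB.getD k [] = (ls.filter (fun p => p.1 == k)).map (·.2) := by
    rw [hdB]
    have := PySem.Dict.getD_foldl_modify_append ls d0 k
    rw [this, hd0, pv_getD_seed l PySem.Dict.empty (by simp) k, List.nil_append]
  have hpair : ((ls.filter (fun p => p.1 == k)).map (·.2)).Pairwise (· ≤ ·) := by
    refine List.pairwise_map.mpr ?_
    exact ((PySem.List.sorted_pairwise l (fun p => p.2)).sublist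
      List.filter_sublist)
  have hfperm : ((ls.filter (fun p => p.1 == k)).map (·.2)).Perm
      ((l.filter (fun p => p.1 == k)).map (·.2)) :=
    (hperm.filter _).map _
  have hsorted : PySem.List.sorted ((l.filter (fun p => p.1 == k)).map (·.2)) (fun x => x) false
      = (ls.filter (fun p => p.1 == k)).map (·.2) :=
    PySem.List.sorted_id_eq_of_perm_of_pairwise _ _ hfperm hpair
  rw [hA, hB, hsorted]
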